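-- pv_equiv track=rewrite | github.com/ranbirchawla-VLC/vlc-openclaw | skills/grailzee-eval/scripts/ingest.py | detect_named_special
-- ===== SOURCE A (Python) =====
-- NAMED_SPECIAL_SOURCE_PATTERNS: dict[str, str] = {
--     "skeletonized": "skeleton",
--     "skeleton": "skeleton",
--     "wimbledon": "wimbledon",
--     "reverse panda": "reverse_panda",
--     "panda": "panda",
--     "mother of pearl": "mother_of_pearl",
--     "mother-of-pearl": "mother_of_pearl",
--     "mop": "mother_of_pearl",
--     "meteorite": "meteorite",
--     "tiffany": "tiffany",
--     "aventurine": "aventurine",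
--     "tapestry": "tapestry",
--     "pavé": "pave",
--     "pave": "pave",
--     "linen": "linen",
--     "celebration": "celebration",
--     "tropical": "tropical",
-- }
--
-- def detect_named_special(descriptor: str) -> str | None:
--     """Decision 3 compound detection with longest-match-wins.
--
--     Operator plan-review 2026-04-24: longest-match (not first-match by
--     vocabulary order). A "Reverse Panda" descriptor returns
--     "reverse_panda", not "panda". Tie broken by source-pattern
--     alphabetical order for determinism (extremely unlikely tie).
--     """
--     desc_lower = descriptor.lower()
--     best_length = -1
--     best_pattern = ""
--     best_slug: str | None = None
--     for src, slug in NAMED_SPECIAL_SOURCE_PATTERNS.items():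
--         if src in desc_lower:
--             length = len(src)
--             if length > best_length or (length == best_length and src < best_pattern):
--                 best_length = length
--                 best_pattern = src
--                 best_slug = slug
--     return best_slug
-- ===== SOURCE B (Python) =====
-- NAMED_SPECIAL_SOURCE_PATTERNS: dict[str, str] = {
--     "skeletonized": "skeleton",
--     "skeleton": "skeleton",
--     "wimbledon": "wimbledon",
--     "reverse panda": "reverse_panda",
--     "panda": "panda",
--     "mother of pearl": "mother_of_pearl",
--     "mother-of-pearl": "mother_of_pearl",
--     "mop": "mother_of_pearl",
--     "meteorite": "meteorite",
--     "tiffany": "tiffany",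
--     "aventurine": "aventurine",
--     "tapestry": "tapestry",
--     "pavé": "pave",
--     "pave": "pave",
--     "linen": "linen",
--     "celebration": "celebration",
--     "tropical": "tropical",
-- }
--
-- _ORDERED_PATTERNS = sorted(
--     NAMED_SPECIAL_SOURCE_PATTERNS.items(),
--     key=lambda kv: (-len(kv[0]), kv[0]),
-- )
--
-- def detect_named_special(descriptor: str) -> str | None:
--     desc_lower = descriptor.lower()
--     for src, slug in _ORDERED_PATTERNS:
--         if src in desc_lower:
--             return slug
--     return None
-- ===== Notes on version B (the rewrite author's own statement) =====
-- stated objective: simpler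
-- what changed: A scans every pattern tracking the best (length, alphabetical) match; B pre-sorts the patterns once by (-length, pattern) and returns the slug of the first pattern that is a substring, dropping the best-tracking state entirely.
import Mathlib
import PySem

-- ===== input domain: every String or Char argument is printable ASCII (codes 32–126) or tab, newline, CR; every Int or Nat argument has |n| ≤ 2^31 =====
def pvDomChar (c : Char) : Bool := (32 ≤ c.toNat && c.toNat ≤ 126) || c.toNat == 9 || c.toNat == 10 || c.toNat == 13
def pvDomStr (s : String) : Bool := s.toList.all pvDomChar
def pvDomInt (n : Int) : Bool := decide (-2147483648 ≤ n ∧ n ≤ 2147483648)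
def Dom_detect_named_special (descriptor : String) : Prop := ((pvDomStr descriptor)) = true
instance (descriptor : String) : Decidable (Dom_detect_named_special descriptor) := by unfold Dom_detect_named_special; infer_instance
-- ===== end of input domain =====

-- B replaces A's best-(length, pattern)-tracking scan by one pre-sorted pass (patterns ordered by
-- (-length, pattern), first substring hit wins); same result, simpler control flow, no speed claim.

-- ===== PORT A =====
def NAMED_SPECIAL_SOURCE_PATTERNS : List (String × String) :=
  [("skeletonized", "skeleton"), ("skeleton", "skeleton"), ("wimbledon", "wimbledon"),
   ("reverse panda", "reverse_panda"), ("panda", "panda"), ("mother of pearl", "mother_of_pearl"),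
   ("mother-of-pearl", "mother_of_pearl"), ("mop", "mother_of_pearl"), ("meteorite", "meteorite"),
   ("tiffany", "tiffany"), ("aventurine", "aventurine"), ("tapestry", "tapestry"),
   ("pavé", "pave"), ("pave", "pave"), ("linen", "linen"), ("celebration", "celebration"),
   ("tropical", "tropical")]

-- loop body of A; state = (best_length, best_pattern, best_slug); Python's 'src < best_pattern'
-- is '<' on .toList (code-point lexicographic, per the PySem string-comparison convention)
def pvStepA (desc_lower : String) (st : Int × String × Option String) (kv : String × String) :
    Int × String × Option String :=
  if PySem.Str.isIn kv.1 desc_lower then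
    if PySem.Str.len kv.1 > st.1 ∨ (PySem.Str.len kv.1 = st.1 ∧ kv.1.toList < st.2.1.toList) then
      (PySem.Str.len kv.1, kv.1, some kv.2)
    else st
  else st

def detect_named_special (descriptor : String) : Option String :=
  let desc_lower := PySem.Str.lower descriptor
  (NAMED_SPECIAL_SOURCE_PATTERNS.foldl (pvStepA desc_lower) (-1, "", none)).2.2

-- ===== PORT B =====
-- the patterns sorted once by key (-len(src), src), as in Source B's module-level sorted(...)
def pvOrderedPatterns : List (String × String) :=
  PySem.List.sorted2 NAMED_SPECIAL_SOURCE_PATTERNS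
    (fun kv => -(PySem.Str.len kv.1)) (fun kv => kv.1.toList)

def detect_named_special_alt (descriptor : String) : Option String :=
  let desc_lower := PySem.Str.lower descriptor
  (pvOrderedPatterns.find? (fun kv => PySem.Str.isIn kv.1 desc_lower)).map Prod.snd

-- ===== PRECONDITION & SPEC =====
def Spec_detect_named_special (descriptor : String) (out : Option String) : Prop := out = detect_named_special_alt descriptor
instance (descriptor : String) (out : Option String) : Decidable (Spec_detect_named_special descriptor out) := by unfold Spec_detect_named_special; infer_instance

-- ===== CLAIM (what is proved, stated in full; the proofs are below) =====
def Claim_equal_detect_named_special : Prop := ∀ (descriptor : String), Dom_detect_named_special descriptor → Spec_detect_named_special descriptor (detect_named_special descriptor)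

-- ===== LEMMAS AND PROOFS =====

-- strict "better match" order on patterns: longer wins, code-point alphabetical breaks ties
def pvBetter (s t : String) : Bool :=
  decide (PySem.Str.len s > PySem.Str.len t) ||
    (decide (PySem.Str.len s = PySem.Str.len t) && decide (s.toList < t.toList))

theorem pvBetter_iff (s t : String) : pvBetter s t = true ↔
    (PySem.Str.len s > PySem.Str.len t ∨
      (PySem.Str.len s = PySem.Str.len t ∧ s.toList < t.toList)) := by
  simp [pvBetter]

-- abstract form of A's loop: keep the better of the current best and the new match
def pvCombine (p : String → Bool) (acc : Option (String × String)) (kv : String × String) :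
    Option (String × String) :=
  if p kv.1 then
    match acc with
    | none => some kv
    | some y => if pvBetter kv.1 y.1 then some kv else acc
  else acc

-- A's loop state as a function of the abstract accumulator
def pvRepr (acc : Option (String × String)) : Int × String × Option String :=
  match acc with
  | none => (-1, "", none)
  | some y => (PySem.Str.len y.1, y.1, some y.2)

theorem pvLen_nonneg (s : String) : 0 ≤ PySem.Str.len s := by
  simp [PySem.Str.len_eq]

theorem pvBetter_asymm {s t : String} (h : pvBetter s t = true) : pvBetter t s = false := by
  rw [Bool.eq_false_iff]
  intro hc
  rw [pvBetter_iff] at h hc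
  rcases h with h | ⟨h1, h2⟩ <;> rcases hc with hc | ⟨hc1, hc2⟩
  · omega
  · omega
  · omega
  · exact lt_asymm h2 hc2

theorem pvBetter_total {s t : String} (h : s ≠ t) :
    pvBetter s t = true ∨ pvBetter t s = true := by
  rw [pvBetter_iff, pvBetter_iff]
  rcases lt_trichotomy (PySem.Str.len s) (PySem.Str.len t) with hl | hl | hl
  · exact Or.inr (Or.inl hl)
  · have hne : s.toList ≠ t.toList := fun hh => h (String.toList_inj.mp hh)
    rcases lt_or_gt_of_ne hne with hs | hs
    · exact Or.inl (Or.inr ⟨hl, hs⟩)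
    · exact Or.inr (Or.inr ⟨hl.symm, hs⟩)
  · exact Or.inl (Or.inl hl)

theorem pvBetter_trans {s t u : String} (h1 : pvBetter s t = true) (h2 : pvBetter t u = true) :
    pvBetter s u = true := by
  rw [pvBetter_iff] at h1 h2 ⊢
  rcases h1 with h1 | ⟨he1, hl1⟩ <;> rcases h2 with h2 | ⟨he2, hl2⟩
  · exact Or.inl (lt_trans h2 h1)
  · exact Or.inl (by omega)
  · exact Or.inl (by omega)
  · exact Or.inr ⟨by omega, lt_trans hl1 hl2⟩

-- A's loop body is pvCombine through pvRepr
theorem pvStepA_repr (desc : String) (acc : Option (String × String)) (kv : String × String) :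
    pvStepA desc (pvRepr acc) kv = pvRepr (pvCombine (fun s => PySem.Str.isIn s desc) acc kv) := by
  rcases hp : PySem.Str.isIn kv.1 desc with _ | _
  · simp only [pvStepA, pvCombine, hp, Bool.false_eq_true, if_false]
  · cases acc with
    | none =>
        simp only [pvStepA, pvCombine, pvRepr, hp, if_true]
        rw [if_pos (Or.inl (by have := pvLen_nonneg kv.1; omega))]
    | some y =>
        simp only [pvStepA, pvCombine, pvRepr, hp, if_true]
        by_cases hb : pvBetter kv.1 y.1 = true
        · rw [if_pos ((pvBetter_iff _ _).mp hb), if_pos hb]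
        · rw [if_neg (fun hc => hb ((pvBetter_iff _ _).mpr hc)), if_neg hb]

theorem pvFoldl_repr (desc : String) (L : List (String × String)) (acc : Option (String × String)) :
    L.foldl (pvStepA desc) (pvRepr acc) =
      pvRepr (L.foldl (pvCombine (fun s => PySem.Str.isIn s desc)) acc) := by
  induction L generalizing acc with
  | nil => rfl
  | cons kv t ih => rw [List.foldl_cons, List.foldl_cons, pvStepA_repr]; exact ih _

-- combining is order-insensitive for pairs with distinct sources
theorem pvCombine_comm (p : String → Bool) (x y : String × String)
    (hxy : x.1 = y.1 → x = y) (z : Option (String × String)) :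
    pvCombine p (pvCombine p z x) y = pvCombine p (pvCombine p z y) x := by
  by_cases hx : x = y
  · rw [hx]
  have hne : x.1 ≠ y.1 := fun h => hx (hxy h)
  rcases hpx : p x.1 with _ | _ <;> rcases hpy : p y.1 with _ | _
  · cases z <;> simp [pvCombine, hpx, hpy]
  · cases z <;> simp [pvCombine, hpx, hpy]
  · cases z <;> simp [pvCombine, hpx, hpy]
  · cases z with
    | none =>
        rcases pvBetter_total hne with hb | hb <;>
          simp [pvCombine, hpx, hpy, hb, pvBetter_asymm hb]
    | some w =>
        rcases hxw : pvBetter x.1 w.1 with _ | _ <;> rcases hyw : pvBetter y.1 w.1 with _ | _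
        · simp [pvCombine, hpx, hpy, hxw, hyw]
        · have hxy2 : pvBetter x.1 y.1 = false := by
            rcases hxb : pvBetter x.1 y.1 with _ | _
            · rfl
            · have := pvBetter_trans hxb hyw
              rw [this] at hxw; exact absurd hxw (by simp)
          simp [pvCombine, hpx, hpy, hxw, hyw, hxy2]
        · have hyx2 : pvBetter y.1 x.1 = false := by
            rcases hyb : pvBetter y.1 x.1 with _ | _
            · rfl
            · have := pvBetter_trans hyb hxw
              rw [this] at hyw; exact absurd hyw (by simp)
          simp [pvCombine, hpx, hpy, hxw, hyw, hyx2]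
        · rcases pvBetter_total hne with hb | hb <;>
            simp [pvCombine, hpx, hpy, hxw, hyw, hb, pvBetter_asymm hb]

-- once the best is held and everything remaining is worse, the fold keeps it
theorem pvFoldl_keep (p : String → Bool) (rest : List (String × String)) (z : String × String)
    (h : ∀ y ∈ rest, pvBetter z.1 y.1 = true) :
    rest.foldl (pvCombine p) (some z) = some z := by
  induction rest with
  | nil => rfl
  | cons y t ih =>
      have hy : pvBetter y.1 z.1 = false := pvBetter_asymm (h y List.mem_cons_self)
      have hstep : pvCombine p (some z) y = some z := by
        rcases hp : p y.1 with _ | _ <;> simp [pvCombine, hp, hy]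
      rw [List.foldl_cons, hstep]
      exact ih (fun u hu => h u (List.mem_cons_of_mem _ hu))

-- on a strictly better-sorted list the fold is first-match
theorem pvFoldl_sorted_find (p : String → Bool) (S : List (String × String))
    (hs : S.Pairwise (fun a b => pvBetter a.1 b.1 = true)) :
    S.foldl (pvCombine p) none = S.find? (fun kv => p kv.1) := by
  induction S with
  | nil => rfl
  | cons kv t ih =>
      rcases List.pairwise_cons.mp hs with ⟨h1, h2⟩
      rcases hp : p kv.1 with _ | _
      · have hnone : pvCombine p none kv = none := by simp [pvCombine, hp]
        rw [List.foldl_cons, hnone, ih h2]; simp [hp]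
      · have hsome : pvCombine p none kv = some kv := by simp [pvCombine, hp]
        rw [List.foldl_cons, hsome, pvFoldl_keep p t kv h1]; simp [hp]

set_option maxRecDepth 40000 in
theorem pvSorted_pairwise :
    pvOrderedPatterns.Pairwise (fun a b => pvBetter a.1 b.1 = true) := by decide

theorem pvKeys_inj : ∀ x ∈ NAMED_SPECIAL_SOURCE_PATTERNS, ∀ y ∈ NAMED_SPECIAL_SOURCE_PATTERNS,
    x.1 = y.1 → x = y := by decide

-- ===== VERDICT (by name: the statement is the Claim_ definition above) =====
theorem detect_named_special_spec : Claim_equal_detect_named_special := by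
  intro descriptor _
  unfold Spec_detect_named_special
  show (NAMED_SPECIAL_SOURCE_PATTERNS.foldl (pvStepA (PySem.Str.lower descriptor))
      ((-1 : Int), "", (none : Option String))).2.2 =
    (pvOrderedPatterns.find?
      (fun kv => PySem.Str.isIn kv.1 (PySem.Str.lower descriptor))).map Prod.snd
  set desc := PySem.Str.lower descriptor with hdesc
  set p : String → Bool := fun s => PySem.Str.isIn s desc with hp
  have hA : NAMED_SPECIAL_SOURCE_PATTERNS.foldl (pvStepA desc) ((-1 : Int), "", (none : Option String)) =
      pvRepr (NAMED_SPECIAL_SOURCE_PATTERNS.foldl (pvCombine p) none) :=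
    pvFoldl_repr desc NAMED_SPECIAL_SOURCE_PATTERNS none
  have hperm : pvOrderedPatterns.Perm NAMED_SPECIAL_SOURCE_PATTERNS :=
    PySem.List.sorted2_perm _ _ _ _
  have hfold : pvOrderedPatterns.foldl (pvCombine p) none =
      NAMED_SPECIAL_SOURCE_PATTERNS.foldl (pvCombine p) none := by
    refine hperm.foldl_eq' ?_ none
    intro x hx y hy z
    exact pvCombine_comm p x y
      (pvKeys_inj x (hperm.mem_iff.mp hx) y (hperm.mem_iff.mp hy)) z
  have hfind : NAMED_SPECIAL_SOURCE_PATTERNS.foldl (pvCombine p) none =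
      pvOrderedPatterns.find? (fun kv => p kv.1) := by
    rw [← hfold, pvFoldl_sorted_find p _ pvSorted_pairwise]
  rw [hA, hfind]
  cases pvOrderedPatterns.find? (fun kv => p kv.1) <;> rfl
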